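-- pv_equiv track=rewrite | github.com/MauroPanzini/python_practicas | stark/ejercicio_heroes_02.py | determinar_cantidad_por_color_ojos
-- ===== SOURCE A (Python) =====
-- def determinar_cantidad_por_color_ojos(lista):
--     lista_color_ojos = {}
--
--     for heroe in lista:
--         color_ojos = heroe["color_ojos"]
--         if color_ojos in lista_color_ojos:
--             lista_color_ojos[color_ojos] += 1
--         else:
--             lista_color_ojos[color_ojos] = 1
--
--     return lista_color_ojos
-- ===== SOURCE B (Python) =====
-- def determinar_cantidad_por_color_ojos(lista):
--     colores = [heroe["color_ojos"] for heroe in lista]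
--     return {color: colores.count(color) for color in dict.fromkeys(colores)}
-- ===== Notes on version B (the rewrite author's own statement) =====
-- stated objective: alternative
-- what changed: B replaces A's incremental dict-counter loop by extracting the colour list once, deduplicating it in first-occurrence order with dict.fromkeys, and building the result via a comprehension that counts each distinct colour with list.count.
import Mathlib
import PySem

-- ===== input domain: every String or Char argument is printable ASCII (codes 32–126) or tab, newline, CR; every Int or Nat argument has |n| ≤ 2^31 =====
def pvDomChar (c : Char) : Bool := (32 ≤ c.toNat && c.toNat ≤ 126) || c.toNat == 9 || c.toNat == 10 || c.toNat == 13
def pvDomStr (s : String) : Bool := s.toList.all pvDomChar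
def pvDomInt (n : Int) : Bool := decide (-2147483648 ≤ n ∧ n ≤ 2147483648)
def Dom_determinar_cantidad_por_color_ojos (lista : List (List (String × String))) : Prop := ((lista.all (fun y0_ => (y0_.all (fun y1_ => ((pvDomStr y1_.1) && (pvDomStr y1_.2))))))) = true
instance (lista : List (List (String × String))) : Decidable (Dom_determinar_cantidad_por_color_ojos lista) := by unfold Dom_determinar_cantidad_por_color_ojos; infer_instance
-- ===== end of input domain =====

-- B extracts the colour list once, dedups it in first-occurrence order and counts each colour, instead of A's incremental dict-counter loop (alternative decomposition, same result).


-- ===== PORT A =====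
def determinar_cantidad_por_color_ojos (lista : List (List (String × String))) : List (String × Int) :=
  (lista.foldl (fun d heroe =>
      match (PySem.Dict.mk heroe).get? "color_ojos" with
      | none => d   -- Python raises KeyError here; excluded by Pre_
      | some color_ojos =>
          if d.contains color_ojos then
            d.insert color_ojos (d.getD color_ojos 0 + 1)   -- lista_color_ojos[color_ojos] += 1
          else
            d.insert color_ojos 1)
    (PySem.Dict.empty : PySem.Dict String Int)).items

-- ===== PORT B =====
def determinar_cantidad_por_color_ojos_alt (lista : List (List (String × String))) : List (String × Int) :=
  let colores := lista.map (fun heroe => ((PySem.Dict.mk heroe).get? "color_ojos").getD "")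
  (PySem.List.dedup colores).map (fun color => (color, (colores.count color : Int)))

-- ===== PRECONDITION & SPEC =====
-- Pre_ excludes exactly the heroes lacking the "color_ojos" key, where Python A raises KeyError.
def Pre_determinar_cantidad_por_color_ojos (lista : List (List (String × String))) : Prop :=
  ∀ heroe ∈ lista, (PySem.Dict.mk heroe).contains "color_ojos" = true
instance (lista : List (List (String × String))) : Decidable (Pre_determinar_cantidad_por_color_ojos lista) := by unfold Pre_determinar_cantidad_por_color_ojos; infer_instance
def pvWitness_determinar_cantidad_por_color_ojos : (List (List (String × String))) := ([[("color_ojos", "azul")], [("color_ojos", "verde"), ("nombre", "x")], [("color_ojos", "azul")]])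

def Spec_determinar_cantidad_por_color_ojos (lista : List (List (String × String))) (out : List (String × Int)) : Prop := out = determinar_cantidad_por_color_ojos_alt lista
instance (lista : List (List (String × String))) (out : List (String × Int)) : Decidable (Spec_determinar_cantidad_por_color_ojos lista out) := by unfold Spec_determinar_cantidad_por_color_ojos; infer_instance

-- ===== CLAIM (what is proved, stated in full; the proofs are below) =====
def Claim_equal_determinar_cantidad_por_color_ojos : Prop := ∀ (lista : List (List (String × String))), Dom_determinar_cantidad_por_color_ojos lista → Pre_determinar_cantidad_por_color_ojos lista → Spec_determinar_cantidad_por_color_ojos lista (determinar_cantidad_por_color_ojos lista)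

-- ===== LEMMAS AND PROOFS =====

-- Under Pre_, A's loop is the standard counter fold over the extracted colour list.
theorem pv_fold_eq_counter (lista : List (List (String × String)))
    (h : Pre_determinar_cantidad_por_color_ojos lista) :
    (lista.foldl (fun d heroe =>
      match (PySem.Dict.mk heroe).get? "color_ojos" with
      | none => d
      | some color_ojos =>
          if d.contains color_ojos then
            d.insert color_ojos (d.getD color_ojos 0 + 1)
          else
            d.insert color_ojos 1)
      (PySem.Dict.empty : PySem.Dict String Int))
    = PySem.Dict.counter (lista.map (fun heroe => ((PySem.Dict.mk heroe).get? "color_ojos").getD "")) := by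
  rw [← PySem.Dict.foldl_insert_getD_add_one_eq_counter, List.foldl_map]
  apply PySem.List.foldl_congr_mem
  intro d heroe hmem
  have hc := h heroe hmem
  rw [PySem.Dict.contains_eq_isSome_get?] at hc
  cases hget : (PySem.Dict.mk heroe).get? "color_ojos" with
  | none => simp [hget] at hc
  | some c =>
    simp only [Option.getD_some]
    by_cases hcd : d.contains c = true
    · simp [hcd]
    · have hcd' : d.contains c = false := by simpa using hcd
      rw [PySem.Dict.getD_of_not_contains d 0 hcd']
      simp [hcd']

-- ===== VERDICT (by name: the statement is the Claim_ definition above) =====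
theorem determinar_cantidad_por_color_ojos_spec : Claim_equal_determinar_cantidad_por_color_ojos := by
  intro lista _ hpre
  unfold Spec_determinar_cantidad_por_color_ojos determinar_cantidad_por_color_ojos determinar_cantidad_por_color_ojos_alt
  rw [pv_fold_eq_counter lista hpre, PySem.Dict.items_counter]
  simp [PySem.List.dedup_eq_ofList]
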